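-- pv_equiv track=rewrite | github.com/canzarlab/McSplicer | python_scripts/new_gtf_genome_wide_parser.py | create_location_dicts
-- ===== SOURCE A (Python) =====
-- def create_location_dicts(start_sites, end_sites, strand_dir):
--     """ This func expects sorted start_sites and end_sites based on strand direction
--     Returns 3 dicts:
--     loc_index_dict ->   Key: location, val: index
--     start_sites_dict -> key: start location, index (helps to determine s1, s2, ...)
--     end_sites_dict ->   key: end location, index (helps to determine e1, e2, ...)
--     """
--
--     loc_index_dict = {}
--     start_sites_dict = {}
--     end_sites_dict = {}
--
--     location_list = []      # List of all start and end locations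
--     location_list.extend(start_sites)
--     location_list.extend(end_sites)
--
--     if strand_dir == '+':
--         location_list.sort()
--     else:
--         location_list.sort(reverse=True)
--
--     index = 0
--     #print 'index','location'
--     for location in location_list:
--         #if location not in loc_index_dict:
--             #print index, location
--         loc_index_dict[location] = index
--         index+=1
--
--     index = 0
--     for location in start_sites:
--         start_sites_dict[location] = index
--         index+=1
--
--     index = 0
--     for location in end_sites:
--         end_sites_dict[location] = index
--         index+=1
--
--
--     return loc_index_dict, start_sites_dict, end_sites_dict
-- ===== SOURCE B (Python) =====
-- def create_location_dicts(start_sites, end_sites, strand_dir):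
--     """Counting-based re-implementation: count multiplicities once, sort only the
--     distinct locations, and assign each distinct location its last sorted index
--     via a running prefix sum of counts."""
--     counts = {}
--     for v in start_sites:
--         counts[v] = counts.get(v, 0) + 1
--     for v in end_sites:
--         counts[v] = counts.get(v, 0) + 1
--
--     loc_index_dict = {}
--     total = 0
--     for v in sorted(counts, reverse=(strand_dir != '+')):
--         total += counts[v]
--         loc_index_dict[v] = total - 1
--
--     start_sites_dict = {v: i for i, v in enumerate(start_sites)}
--     end_sites_dict = {v: i for i, v in enumerate(end_sites)}
--
--     return loc_index_dict, start_sites_dict, end_sites_dict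
-- ===== Notes on version B (the rewrite author's own statement) =====
-- stated objective: alternative
-- what changed: Instead of sorting the full start+end multiset and overwriting dict entries index by index, B counts multiplicities in one pass, sorts only the distinct locations, and assigns each distinct location its last sorted index by a running prefix sum of counts; the per-site dicts are built by enumerate comprehensions.
import Mathlib
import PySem

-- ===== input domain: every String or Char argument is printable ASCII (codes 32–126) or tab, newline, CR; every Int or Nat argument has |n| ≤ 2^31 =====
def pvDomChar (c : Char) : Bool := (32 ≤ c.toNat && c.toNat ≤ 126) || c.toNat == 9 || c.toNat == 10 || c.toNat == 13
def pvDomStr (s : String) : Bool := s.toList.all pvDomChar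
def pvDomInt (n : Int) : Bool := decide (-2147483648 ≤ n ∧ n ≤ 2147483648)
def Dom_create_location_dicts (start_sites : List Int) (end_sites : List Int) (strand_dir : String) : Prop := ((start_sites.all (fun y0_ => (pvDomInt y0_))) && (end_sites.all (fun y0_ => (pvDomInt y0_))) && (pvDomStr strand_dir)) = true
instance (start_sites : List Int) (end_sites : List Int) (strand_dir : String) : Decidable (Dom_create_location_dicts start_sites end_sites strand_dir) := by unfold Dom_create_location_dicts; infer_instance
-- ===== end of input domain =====

-- B replaces A's full sort of the start+end multiset by counting multiplicities once,
-- sorting only the distinct locations and assigning last-sorted-index via a prefix sum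
-- of counts (objective: alternative algorithm; same exact dicts).

-- ===== PORT A =====
def create_location_dicts (start_sites : List Int) (end_sites : List Int) (strand_dir : String) : (List (Int × Int)) × (List (Int × Int)) × (List (Int × Int)) :=
  -- location_list = start_sites ++ end_sites, then .sort() / .sort(reverse=True)
  let location_list : List Int := start_sites ++ end_sites
  let location_list : List Int :=
    if strand_dir == "+" then PySem.List.sorted location_list (fun x => x) false
    else PySem.List.sorted location_list (fun x => x) true
  -- index = 0; for location in location_list: loc_index_dict[location] = index; index += 1
  let loc_index_dict : PySem.Dict Int Int :=
    (location_list.foldl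
      (fun (st : PySem.Dict Int Int × Int) location => (st.1.insert location st.2, st.2 + 1))
      (PySem.Dict.empty, 0)).1
  let start_sites_dict : PySem.Dict Int Int :=
    (start_sites.foldl
      (fun (st : PySem.Dict Int Int × Int) location => (st.1.insert location st.2, st.2 + 1))
      (PySem.Dict.empty, 0)).1
  let end_sites_dict : PySem.Dict Int Int :=
    (end_sites.foldl
      (fun (st : PySem.Dict Int Int × Int) location => (st.1.insert location st.2, st.2 + 1))
      (PySem.Dict.empty, 0)).1
  (loc_index_dict.items, start_sites_dict.items, end_sites_dict.items)

-- ===== PORT B =====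
def create_location_dicts_alt (start_sites : List Int) (end_sites : List Int) (strand_dir : String) : (List (Int × Int)) × (List (Int × Int)) × (List (Int × Int)) :=
  -- counts[v] = counts.get(v, 0) + 1 over start_sites then end_sites
  let counts : PySem.Dict Int Int :=
    end_sites.foldl (fun d v => d.insert v (d.getD v 0 + 1))
      (start_sites.foldl (fun d v => d.insert v (d.getD v 0 + 1)) PySem.Dict.empty)
  -- for v in sorted(counts, reverse=(strand_dir != '+')): total += counts[v]; loc[v] = total - 1
  -- counts[v] is a present-key lookup, modelled by getD (v is always a key of counts)
  let loc_index_dict : PySem.Dict Int Int :=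
    ((PySem.List.sorted counts.keys (fun x => x) (!(strand_dir == "+"))).foldl
      (fun (st : PySem.Dict Int Int × Int) v =>
        let total := st.2 + counts.getD v 0
        (st.1.insert v (total - 1), total))
      (PySem.Dict.empty, 0)).1
  -- {v: i for i, v in enumerate(...)}
  let start_sites_dict : PySem.Dict Int Int :=
    (PySem.List.enumerate start_sites 0).foldl (fun d p => d.insert p.2 p.1) PySem.Dict.empty
  let end_sites_dict : PySem.Dict Int Int :=
    (PySem.List.enumerate end_sites 0).foldl (fun d p => d.insert p.2 p.1) PySem.Dict.empty
  (loc_index_dict.items, start_sites_dict.items, end_sites_dict.items)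

-- ===== PRECONDITION & SPEC =====
def Spec_create_location_dicts (start_sites : List Int) (end_sites : List Int) (strand_dir : String) (out : (List (Int × Int)) × (List (Int × Int)) × (List (Int × Int))) : Prop := out = create_location_dicts_alt start_sites end_sites strand_dir
instance (start_sites : List Int) (end_sites : List Int) (strand_dir : String) (out : (List (Int × Int)) × (List (Int × Int)) × (List (Int × Int))) : Decidable (Spec_create_location_dicts start_sites end_sites strand_dir out) := by unfold Spec_create_location_dicts; infer_instance

-- ===== CLAIM (what is proved, stated in full; the proofs are below) =====
def Claim_equal_create_location_dicts : Prop := ∀ (start_sites : List Int) (end_sites : List Int) (strand_dir : String), Dom_create_location_dicts start_sites end_sites strand_dir → Spec_create_location_dicts start_sites end_sites strand_dir (create_location_dicts start_sites end_sites strand_dir)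

-- ===== LEMMAS AND PROOFS =====

-- spec of A's run over a sorted list: for each maximal run of equal values starting at
-- index t, the dict ends up with (value, index of the run's last element)
def runSpec : Int → List Int → List (Int × Int)
  | _, [] => []
  | t, v :: vs =>
      (v, t + (vs.takeWhile (fun x => x == v)).length) ::
        runSpec (t + (vs.takeWhile (fun x => x == v)).length + 1) (vs.dropWhile (fun x => x == v))
termination_by _ l => l.length
decreasing_by
  simp only [List.length_cons]
  have := List.length_dropWhile_le (fun x => x == v) vs
  omega

-- spec of B's prefix-sum loop over the distinct keys
def specB (c : Int → Int) : Int → List Int → List (Int × Int)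
  | _, [] => []
  | t, v :: ks => (v, t + c v - 1) :: specB c (t + c v) ks

theorem enum_fold_eq (s : List Int) (d : PySem.Dict Int Int) (t : Int) :
    (PySem.List.enumerate s t).foldl (fun d p => d.insert p.2 p.1) d
      = (s.foldl (fun (st : PySem.Dict Int Int × Int) v => (st.1.insert v st.2, st.2 + 1)) (d, t)).1 := by
  induction s generalizing d t with
  | nil => rfl
  | cons v vs ih =>
      rw [PySem.List.enumerate_cons]
      simp only [List.foldl_cons]
      exact ih (d.insert v t) (t + 1)

theorem fold_snd (l : List Int) (d : PySem.Dict Int Int) (t : Int) :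
    (l.foldl (fun (st : PySem.Dict Int Int × Int) v => (st.1.insert v st.2, st.2 + 1)) (d, t)).2
      = t + l.length := by
  induction l generalizing d t with
  | nil => simp
  | cons v vs ih =>
      simp only [List.foldl_cons, List.length_cons]
      rw [ih]
      push_cast
      ring

theorem sub1 (run : List Int) (v : Int) (h : ∀ x ∈ run, x = v)
    (D : List (Int × Int)) (hD : ∀ p ∈ D, p.1 ≠ v) (j t : Int) :
    ((run.foldl (fun (st : PySem.Dict Int Int × Int) x => (st.1.insert x st.2, st.2 + 1))
        (PySem.Dict.mk (D ++ [(v, j)]), t)).1).items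
      = D ++ [(v, if run.isEmpty then j else t + run.length - 1)] := by
  induction run generalizing j t with
  | nil => rfl
  | cons x rest ih =>
      have hx : x = v := h x (List.mem_cons_self ..)
      subst hx
      have hcont : (PySem.Dict.mk (D ++ [(x, j)])).contains x = true := by
        rw [PySem.Dict.contains_mk]
        simp
      have hins : (PySem.Dict.mk (D ++ [(x, j)])).insert x t = PySem.Dict.mk (D ++ [(x, t)]) := by
        apply PySem.Dict.ext
        rw [PySem.Dict.items_insert_of_contains _ t hcont]
        show (D ++ [(x, j)]).map _ = D ++ [(x, t)]
        rw [List.map_append]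
        congr 1
        · have hfix : ∀ p ∈ D, (fun p : Int × Int => if (p.1 == x) = true then (x, t) else p) p = p := by
            intro p hp
            have := hD p hp
            simp [this]
          rw [List.map_congr_left hfix]
          simp
        · simp
      simp only [List.foldl_cons]
      rw [hins, ih (fun y hy => h y (List.mem_cons_of_mem _ hy)) t (t + 1)]
      have hval : (if rest.isEmpty then t else t + 1 + (rest.length : Int) - 1)
          = (if (x :: rest).isEmpty then j else t + ((x :: rest).length : Int) - 1) := by
        cases rest with
        | nil => simp
        | cons a l =>
            simp only [List.isEmpty_cons, Bool.false_eq_true, if_false, List.length_cons]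
            push_cast
            ring
      rw [hval]

theorem subRun (run : List Int) (v : Int) (h : ∀ x ∈ run, x = v)
    (d : PySem.Dict Int Int) (hv : d.contains v = false) (t : Int) :
    (((v :: run).foldl (fun (st : PySem.Dict Int Int × Int) x => (st.1.insert x st.2, st.2 + 1))
        (d, t)).1).items
      = d.items ++ [(v, t + run.length)] := by
  have hDne : ∀ p ∈ d.items, p.1 ≠ v := by
    intro p hp hpe
    have hc : d.contains v = true := by
      rw [PySem.Dict.contains_iff_mem_keys]
      show v ∈ d.items.map Prod.fst
      exact List.mem_map.2 ⟨p, hp, hpe⟩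
    rw [hv] at hc
    exact Bool.false_ne_true hc
  have hins : d.insert v t = PySem.Dict.mk (d.items ++ [(v, t)]) := by
    apply PySem.Dict.ext
    rw [PySem.Dict.items_insert_of_not_contains _ t hv]
  simp only [List.foldl_cons]
  rw [hins, sub1 run v h d.items hDne t (t + 1)]
  have hval : (if run.isEmpty then t else t + 1 + (run.length : Int) - 1)
      = t + (run.length : Int) := by
    cases run with
    | nil => simp
    | cons a l =>
        simp only [List.isEmpty_cons, Bool.false_eq_true, if_false, List.length_cons]
        push_cast
        ring
  rw [hval]

theorem not_mem_dropWhile (R : Int → Int → Prop)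
    (hA : ∀ a b : Int, R a b → R b a → a = b)
    (v : Int) (vs : List Int) (hp : (v :: vs).Pairwise R) :
    v ∉ vs.dropWhile (fun x => x == v) := by
  induction vs with
  | nil => simp
  | cons x t ih =>
      rw [List.dropWhile_cons]
      split
      · next hx =>
          apply ih
          refine List.pairwise_cons.2 ⟨?_, ?_⟩
          · intro y hy
            exact (List.pairwise_cons.1 hp).1 y (List.mem_cons_of_mem _ hy)
          · exact (List.pairwise_cons.1 (List.pairwise_cons.1 hp).2).2
      · next hx =>
          intro hmem
          rcases List.mem_cons.1 hmem with hvx | hvt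
          · exact hx (by simp [hvx])
          · have h1 : R v x := (List.pairwise_cons.1 hp).1 x (List.mem_cons_self ..)
            have h2 : R x v := (List.pairwise_cons.1 (List.pairwise_cons.1 hp).2).1 v hvt
            exact hx (by simp [hA x v h2 h1])

theorem A_run (R : Int → Int → Prop) (hA : ∀ a b : Int, R a b → R b a → a = b) :
    ∀ (n : Nat) (l : List Int), l.length ≤ n → l.Pairwise R →
      ∀ (d : PySem.Dict Int Int) (t : Int), d.keys.Nodup → (∀ k ∈ d.keys, k ∉ l) →
      ((l.foldl (fun (st : PySem.Dict Int Int × Int) v => (st.1.insert v st.2, st.2 + 1))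
          (d, t)).1).items
        = d.items ++ runSpec t l := by
  intro n
  induction n with
  | zero =>
      intro l hlen _ d t _ _
      have : l = [] := List.eq_nil_of_length_eq_zero (Nat.le_zero.1 hlen)
      subst this
      simp [runSpec]
  | succ n IH =>
      intro l hlen hp d t hnd hdisj
      cases l with
      | nil => simp [runSpec]
      | cons v vs =>
        have hsplit : v :: vs
            = (v :: vs.takeWhile (fun x => x == v)) ++ vs.dropWhile (fun x => x == v) := by
          rw [List.cons_append, List.takeWhile_append_dropWhile]
        have hvd : d.contains v = false := by
          cases hcv : d.contains v with
          | false => rfl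
          | true =>
              exact absurd (List.mem_cons_self ..)
                (hdisj v ((PySem.Dict.contains_iff_mem_keys d v).1 hcv))
        have hrunv : ∀ x ∈ vs.takeWhile (fun x => x == v), x = v := by
          intro x hx
          simpa using List.mem_takeWhile_imp hx
        have hsub := subRun (vs.takeWhile (fun x => x == v)) v hrunv d hvd t
        have hsnd := fold_snd (v :: vs.takeWhile (fun x => x == v)) d t
        have hkeys1 : (((v :: vs.takeWhile (fun x => x == v)).foldl
            (fun (st : PySem.Dict Int Int × Int) x => (st.1.insert x st.2, st.2 + 1)) (d, t)).1).keys
            = d.keys ++ [v] := by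
          simp only [PySem.Dict.keys, hsub, List.map_append]
          rfl
        have hvnk : v ∉ d.keys := fun hk => hdisj v hk (List.mem_cons_self ..)
        have hrest := IH (vs.dropWhile (fun x => x == v))
          (by
            have h1 := List.length_dropWhile_le (fun x => x == v) vs
            have h2 : vs.length ≤ n := by
              simpa using Nat.le_of_succ_le_succ (by simpa using hlen)
            omega)
          (List.Pairwise.sublist ((List.dropWhile_sublist _).trans (List.sublist_cons_self v vs)) hp)
          (((v :: vs.takeWhile (fun x => x == v)).foldl
            (fun (st : PySem.Dict Int Int × Int) x => (st.1.insert x st.2, st.2 + 1)) (d, t)).1)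
          (t + ((vs.takeWhile (fun x => x == v)).length : Int) + 1)
          (by
            rw [hkeys1, List.nodup_append]
            refine ⟨hnd, List.nodup_singleton _, ?_⟩
            intro a ha b hb
            have hbv : b = v := by simpa using hb
            subst hbv
            exact fun he => hvnk (he ▸ ha))
          (by
            rw [hkeys1]
            intro k hk hkr
            rcases List.mem_append.1 hk with hk1 | hk1
            · exact hdisj k hk1
                (List.mem_cons_of_mem _ ((List.dropWhile_sublist (fun x => x == v)).mem hkr))
            · have hkv : k = v := by simpa using hk1
              subst hkv
              exact not_mem_dropWhile R hA k vs hp hkr)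
        have hpair : ((v :: vs.takeWhile (fun x => x == v)).foldl
              (fun (st : PySem.Dict Int Int × Int) x => (st.1.insert x st.2, st.2 + 1)) (d, t))
            = (((v :: vs.takeWhile (fun x => x == v)).foldl
                (fun (st : PySem.Dict Int Int × Int) x => (st.1.insert x st.2, st.2 + 1)) (d, t)).1,
               t + ((vs.takeWhile (fun x => x == v)).length : Int) + 1) := by
          refine Prod.ext rfl ?_
          rw [hsnd]
          push_cast [List.length_cons]
          ring
        conv_lhs => rw [hsplit, List.foldl_append]
        rw [hpair, hrest, hsub, runSpec]
        simp [List.append_assoc]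

theorem bridge (R : Int → Int → Prop)
    (hA : ∀ a b : Int, R a b → R b a → a = b) (hRefl : ∀ a : Int, R a a) :
    ∀ (n : Nat) (l ks : List Int), l.length ≤ n → l.Pairwise R →
      ks.Pairwise (fun a b => R a b ∧ a ≠ b) →
      (∀ x, x ∈ ks ↔ x ∈ l) → ∀ c : Int → Int, (∀ v ∈ l, c v = (l.count v : Int)) →
      ∀ t : Int, runSpec t l = specB c t ks := by
  intro n
  induction n with
  | zero =>
      intro l ks hlen _ _ hmem c _ t
      have hl0 : l = [] := List.eq_nil_of_length_eq_zero (Nat.le_zero.1 hlen)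
      subst hl0
      have : ks = [] := List.eq_nil_iff_forall_not_mem.2 (fun x hx => by simpa using (hmem x).1 hx)
      subst this
      simp [runSpec, specB]
  | succ n IH =>
      intro l ks hlen hl hks hmem c hc t
      cases l with
      | nil =>
          have : ks = [] := List.eq_nil_iff_forall_not_mem.2 (fun x hx => by simpa using (hmem x).1 hx)
          subst this
          simp [runSpec, specB]
      | cons v vs =>
        have hvks : v ∈ ks := (hmem v).2 (List.mem_cons_self ..)
        cases ks with
        | nil => cases hvks
        | cons k0 ks' =>
          have hk0 : k0 = v := by
            rcases List.mem_cons.1 hvks with h | h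
            · exact h.symm
            · have hS := (List.pairwise_cons.1 hks).1 v h
              have hk0l : k0 ∈ v :: vs := (hmem k0).1 (List.mem_cons_self ..)
              have hRv : R v k0 := by
                rcases List.mem_cons.1 hk0l with h' | h'
                · rw [h']
                  exact hRefl _
                · exact (List.pairwise_cons.1 hl).1 _ h'
              exact absurd (hA _ _ hS.1 hRv) hS.2
          subst hk0
          have hvrest : k0 ∉ vs.dropWhile (fun x => x == k0) := not_mem_dropWhile R hA k0 vs hl
          have hcnt : ((k0 :: vs).count k0 : Int)
              = ((vs.takeWhile (fun x => x == k0)).length : Int) + 1 := by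
            have h2 : (vs.takeWhile (fun x => x == k0)).count k0
                = (vs.takeWhile (fun x => x == k0)).length :=
              List.count_eq_length.2 (fun b hb => by
                have hbk : b = k0 := by simpa using List.mem_takeWhile_imp hb
                exact hbk.symm)
            have h3 : (vs.dropWhile (fun x => x == k0)).count k0 = 0 := List.count_eq_zero.2 hvrest
            have h1 : vs.count k0 = (vs.takeWhile (fun x => x == k0)).length := by
              conv_lhs => rw [← List.takeWhile_append_dropWhile (p := fun x => x == k0) (l := vs)]
              rw [List.count_append]
              omega
            rw [List.count_cons_self]
            push_cast [h1]
            ring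
          have hcv : c k0 = ((vs.takeWhile (fun x => x == k0)).length : Int) + 1 := by
            rw [hc k0 (List.mem_cons_self ..), hcnt]
          have hrec := IH (vs.dropWhile (fun x => x == k0)) ks'
            (by
              have ha := List.length_dropWhile_le (fun x => x == k0) vs
              have hb : vs.length ≤ n := by
                simpa using Nat.le_of_succ_le_succ (by simpa using hlen)
              omega)
            (List.Pairwise.sublist ((List.dropWhile_sublist _).trans (List.sublist_cons_self k0 vs)) hl)
            ((List.pairwise_cons.1 hks).2)
            (by
              intro x
              constructor
              · intro hx
                have hxl : x ∈ k0 :: vs := (hmem x).1 (List.mem_cons_of_mem _ hx)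
                have hxne : x ≠ k0 := fun he => ((List.pairwise_cons.1 hks).1 x hx).2 he.symm
                rcases List.mem_cons.1 hxl with h' | h'
                · exact absurd h' hxne
                · conv at h' => rw [← List.takeWhile_append_dropWhile (p := fun x => x == k0) (l := vs)]
                  rcases List.mem_append.1 h' with h'' | h''
                  · exact absurd (by simpa using List.mem_takeWhile_imp h'') hxne
                  · exact h''
              · intro hx
                have hxvs : x ∈ vs := (List.dropWhile_sublist _).mem hx
                have hxks : x ∈ k0 :: ks' := (hmem x).2 (List.mem_cons_of_mem _ hxvs)
                have hxne : x ≠ k0 := fun he => hvrest (he ▸ hx)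
                rcases List.mem_cons.1 hxks with h' | h'
                · exact absurd h' hxne
                · exact h')
            c
            (by
              intro x hx
              have hxvs : x ∈ vs := (List.dropWhile_sublist _).mem hx
              have hxne : x ≠ k0 := fun he => hvrest (he ▸ hx)
              rw [hc x (List.mem_cons_of_mem _ hxvs)]
              have h4 : (vs.takeWhile (fun y => y == k0)).count x = 0 :=
                List.count_eq_zero.2 (fun hmem' => hxne (by simpa using List.mem_takeWhile_imp hmem'))
              have hsplitc : (k0 :: vs).count x = (vs.dropWhile (fun y => y == k0)).count x := by
                conv_lhs =>
                  rw [show vs = vs.takeWhile (fun y => y == k0) ++ vs.dropWhile (fun y => y == k0) from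
                    (List.takeWhile_append_dropWhile ..).symm]
                rw [List.count_cons, List.count_append]
                simp [h4, Ne.symm hxne]
              rw [hsplitc])
            (t + ((vs.takeWhile (fun x => x == k0)).length : Int) + 1)
          rw [runSpec, specB, hrec]
          have harg : t + ((vs.takeWhile (fun x => x == k0)).length : Int) + 1 = t + c k0 := by
            rw [hcv]
            ring
          have hval : t + ((vs.takeWhile (fun x => x == k0)).length : Int) = t + c k0 - 1 := by
            rw [hcv]
            ring
          rw [harg, hval]

theorem B_fold (c : Int → Int) (ks : List Int) :
    ∀ (d : PySem.Dict Int Int) (t : Int), ks.Nodup →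
      (∀ k ∈ ks, d.contains k = false) →
      ((ks.foldl (fun (st : PySem.Dict Int Int × Int) v =>
          (st.1.insert v (st.2 + c v - 1), st.2 + c v)) (d, t)).1).items
        = d.items ++ specB c t ks := by
  induction ks with
  | nil =>
      intro d t _ _
      simp [specB]
  | cons v ks' ih =>
      intro d t hnd h
      simp only [List.foldl_cons]
      have hins : d.insert v (t + c v - 1) = PySem.Dict.mk (d.items ++ [(v, t + c v - 1)]) := by
        apply PySem.Dict.ext
        rw [PySem.Dict.items_insert_of_not_contains _ _ (h v (List.mem_cons_self ..))]
      have hcont2 : ∀ k ∈ ks',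
          (PySem.Dict.mk (d.items ++ [(v, t + c v - 1)])).contains k = false := by
        intro k hk
        have hne : k ≠ v := fun he => (List.nodup_cons.1 hnd).1 (he ▸ hk)
        have hkne : (v == k) = false := by simp [Ne.symm hne]
        rw [PySem.Dict.contains_mk, List.any_append]
        have hdk : d.items.any (fun p => p.1 == k) = false := by
          have hcf := h k (List.mem_cons_of_mem _ hk)
          rw [show d = PySem.Dict.mk d.items from rfl, PySem.Dict.contains_mk] at hcf
          exact hcf
        simp [hdk, hkne]
      rw [hins, ih _ (t + c v) (List.Nodup.of_cons hnd) hcont2]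
      show (d.items ++ [(v, t + c v - 1)]) ++ _ = _
      rw [List.append_assoc]
      rfl

-- ===== VERDICT (by name: the statement is the Claim_ definition above) =====
theorem create_location_dicts_spec : Claim_equal_create_location_dicts := by
  unfold Claim_equal_create_location_dicts
  intro s e sd _
  show create_location_dicts s e sd = create_location_dicts_alt s e sd
  simp only [create_location_dicts, create_location_dicts_alt]
  have hkeys : (List.foldl (fun (d : PySem.Dict Int Int) v => d.insert v (d.getD v 0 + 1))
      (List.foldl (fun (d : PySem.Dict Int Int) v => d.insert v (d.getD v 0 + 1)) PySem.Dict.empty s) e).keys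
      = PySem.Set.ofList (s ++ e) := by
    rw [PySem.Dict.keys_foldl_insert, PySem.Dict.keys_foldl_insert, PySem.Dict.keys_empty,
      PySem.Set.update_nil_left, ← PySem.Set.ofList_append]
  have hgetD : ∀ v : Int, (List.foldl (fun (d : PySem.Dict Int Int) v => d.insert v (d.getD v 0 + 1))
      (List.foldl (fun (d : PySem.Dict Int Int) v => d.insert v (d.getD v 0 + 1)) PySem.Dict.empty s) e).getD v 0
      = (((s ++ e).count v : Int)) := by
    intro v
    rw [PySem.Dict.getD_foldl_insert_add_one, PySem.Dict.getD_foldl_insert_add_one,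
      PySem.Dict.getD_empty]
    push_cast [List.count_append]
    ring
  set counts := (List.foldl (fun (d : PySem.Dict Int Int) v => d.insert v (d.getD v 0 + 1))
      (List.foldl (fun (d : PySem.Dict Int Int) v => d.insert v (d.getD v 0 + 1)) PySem.Dict.empty s) e) with hcounts
  cases hsd : sd == "+" with
  | true =>
      simp only [Bool.not_true, if_true, Prod.mk.injEq]
      have hksnodup : (PySem.List.sorted counts.keys (fun x => x) false).Nodup :=
        ((PySem.List.sorted_perm counts.keys (fun x => x) false).nodup_iff).2
          (by rw [hkeys]; exact PySem.Set.nodup_ofList _)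
      have hb := bridge (fun a b : Int => a ≤ b) (fun a b h1 h2 => le_antisymm h1 h2)
        (fun a => le_refl a)
        (PySem.List.sorted (s ++ e) (fun x => x) false).length
        (PySem.List.sorted (s ++ e) (fun x => x) false)
        (PySem.List.sorted counts.keys (fun x => x) false)
        le_rfl
        (PySem.List.sorted_pairwise (s ++ e) (fun x => x))
        ((PySem.List.sorted_pairwise counts.keys (fun x => x)).and hksnodup)
        (by
          intro x
          simp only [PySem.List.mem_sorted, hkeys, PySem.Set.mem_ofList])
        (fun v => counts.getD v 0)
        (by
          intro v _
          show counts.getD v 0 = _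
          rw [hgetD v]
          exact_mod_cast ((PySem.List.sorted_perm (s ++ e) (fun x => x) false).count_eq v).symm)
        0
      refine ⟨?_, ?_, ?_⟩
      · rw [A_run (fun a b : Int => a ≤ b) (fun a b h1 h2 => le_antisymm h1 h2)
            (PySem.List.sorted (s ++ e) (fun x => x) false).length
            (PySem.List.sorted (s ++ e) (fun x => x) false) le_rfl
            (PySem.List.sorted_pairwise (s ++ e) (fun x => x)) PySem.Dict.empty 0
            (by simp [PySem.Dict.keys_empty])
            (by simp [PySem.Dict.keys_empty])]
        rw [B_fold (fun v => counts.getD v 0) (PySem.List.sorted counts.keys (fun x => x) false)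
            PySem.Dict.empty 0 hksnodup (fun k _ => PySem.Dict.contains_empty k)]
        rw [hb]
      · rw [← enum_fold_eq]
      · rw [← enum_fold_eq]
  | false =>
      simp only [Bool.not_false, Bool.false_eq_true, if_false, Prod.mk.injEq]
      have hksnodup : (PySem.List.sorted counts.keys (fun x => x) true).Nodup :=
        ((PySem.List.sorted_perm counts.keys (fun x => x) true).nodup_iff).2
          (by rw [hkeys]; exact PySem.Set.nodup_ofList _)
      have hb := bridge (fun a b : Int => b ≤ a) (fun a b h1 h2 => le_antisymm h2 h1)
        (fun a => le_refl a)
        (PySem.List.sorted (s ++ e) (fun x => x) true).length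
        (PySem.List.sorted (s ++ e) (fun x => x) true)
        (PySem.List.sorted counts.keys (fun x => x) true)
        le_rfl
        (PySem.List.sorted_pairwise_rev (s ++ e) (fun x => x))
        ((PySem.List.sorted_pairwise_rev counts.keys (fun x => x)).and hksnodup)
        (by
          intro x
          simp only [PySem.List.mem_sorted, hkeys, PySem.Set.mem_ofList])
        (fun v => counts.getD v 0)
        (by
          intro v _
          show counts.getD v 0 = _
          rw [hgetD v]
          exact_mod_cast ((PySem.List.sorted_perm (s ++ e) (fun x => x) true).count_eq v).symm)
        0
      refine ⟨?_, ?_, ?_⟩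
      · rw [A_run (fun a b : Int => b ≤ a) (fun a b h1 h2 => le_antisymm h2 h1)
            (PySem.List.sorted (s ++ e) (fun x => x) true).length
            (PySem.List.sorted (s ++ e) (fun x => x) true) le_rfl
            (PySem.List.sorted_pairwise_rev (s ++ e) (fun x => x)) PySem.Dict.empty 0
            (by simp [PySem.Dict.keys_empty])
            (by simp [PySem.Dict.keys_empty])]
        rw [B_fold (fun v => counts.getD v 0) (PySem.List.sorted counts.keys (fun x => x) true)
            PySem.Dict.empty 0 hksnodup (fun k _ => PySem.Dict.contains_empty k)]
        rw [hb]
      · rw [← enum_fold_eq]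
      · rw [← enum_fold_eq]
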